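-- pv_equiv track=rewrite | github.com/sdcst12-students/b200-Rubyf246 | 200a-Review.py | getMerge
-- ===== SOURCE A (Python) =====
-- def getMerge(list1,list2):
--     # list 1: expected list or tuple
--     # list 2: expected list or tuple
--     # add the elements of list2 into list1
--     # if the list2 element is in list1, add it at the position where it occurs in list1
--     # if the list2 element is not in list1, add it to the end
--     for m in list2:
--         if m in list1:
--             idx = list1.index(m)
--             list1.insert(idx,m)
--         else:
--             list1.append(m)
--     print (list1)
--     return list1
-- ===== SOURCE B (Python) =====
-- def getMerge(list1, list2):
--     # One pass over list2 counting extra copies per value (dict/set lookups O(1)),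
--     # then one pass assembling the result: each FIRST occurrence of a value gets
--     # its extra copies, later occurrences stay single; new values form the tail.
--     # Note: like A, this mutates list1 in place and prints the result.
--     extra = {}
--     seen = set(list1)
--     order = []
--     for m in list2:
--         if m in seen:
--             extra[m] = extra.get(m, 0) + 1
--         else:
--             seen.add(m)
--             order.append(m)
--     out = []
--     emitted = set()
--     for v in list1 + order:
--         if v in emitted:
--             out.append(v)
--         else:
--             emitted.add(v)
--             out.extend([v] * (extra.get(v, 0) + 1))
--     list1[:] = out
--     print(list1)
--     return list1
-- ===== Notes on version B (the rewrite author's own statement) =====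
-- stated objective: faster
-- what changed: Replaces A's per-element linear membership/index/insert on the growing result list by one counting pass over list2 (a set for membership plus a dict of extra copies per value) and one assembly pass that emits each first occurrence with its extra copies and appends new values as a tail.
import Mathlib
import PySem

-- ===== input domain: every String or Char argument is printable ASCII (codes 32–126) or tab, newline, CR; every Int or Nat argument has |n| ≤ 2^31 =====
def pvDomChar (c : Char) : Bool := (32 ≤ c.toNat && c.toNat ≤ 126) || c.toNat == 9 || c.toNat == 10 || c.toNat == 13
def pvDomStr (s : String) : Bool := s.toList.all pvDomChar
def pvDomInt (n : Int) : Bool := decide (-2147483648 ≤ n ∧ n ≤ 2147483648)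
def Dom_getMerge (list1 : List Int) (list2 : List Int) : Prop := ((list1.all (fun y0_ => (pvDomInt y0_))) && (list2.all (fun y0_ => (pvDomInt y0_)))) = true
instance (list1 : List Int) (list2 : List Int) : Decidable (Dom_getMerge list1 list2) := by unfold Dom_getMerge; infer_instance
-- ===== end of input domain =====

-- B replaces A's quadratic membership/index/insert loop by one counting pass and one
-- assembly pass; equivalence is about the RETURN value only (A mutates list1 in place
-- and prints it; the Python B performs the same mutation and print).

-- ===== PORT A =====
-- loop body of A: duplicate m at its first index if present, else append
def mergeStepA (l : List Int) (m : Int) : List Int :=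
  if m ∈ l then
    match PySem.List.index? l m with
    | some idx => PySem.List.insert l (idx : Int) m
    | none => l
  else l ++ [m]

def getMerge (list1 : List Int) (list2 : List Int) : List Int :=
  list2.foldl mergeStepA list1

-- ===== PORT B =====
-- first loop of B: count extra copies per seen value, record unseen values in order
def mergeCount (st : PySem.Dict Int Nat × PySem.Set Int × List Int) (m : Int) :
    PySem.Dict Int Nat × PySem.Set Int × List Int :=
  if PySem.Set.contains st.2.1 m then
    (st.1.insert m (st.1.getD m 0 + 1), st.2.1, st.2.2)
  else
    (st.1, PySem.Set.add st.2.1 m, st.2.2 ++ [m])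

-- second loop of B: emit extra copies at each first occurrence
def mergeEmit (extra : PySem.Dict Int Nat) (st : List Int × PySem.Set Int) (v : Int) :
    List Int × PySem.Set Int :=
  if PySem.Set.contains st.2 v then
    (st.1 ++ [v], st.2)
  else
    (st.1 ++ List.replicate (extra.getD v 0 + 1) v, PySem.Set.add st.2 v)

def getMerge_alt (list1 : List Int) (list2 : List Int) : List Int :=
  let st := list2.foldl mergeCount (PySem.Dict.empty, PySem.Set.ofList list1, [])
  ((list1 ++ st.2.2).foldl (mergeEmit st.1) ([], PySem.Set.empty)).1

-- ===== PRECONDITION & SPEC =====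
def Spec_getMerge (list1 : List Int) (list2 : List Int) (out : List Int) : Prop := out = getMerge_alt list1 list2
instance (list1 : List Int) (list2 : List Int) (out : List Int) : Decidable (Spec_getMerge list1 list2 out) := by unfold Spec_getMerge; infer_instance

-- ===== CLAIM (what is proved, stated in full; the proofs are below) =====
def Claim_equal_getMerge : Prop := ∀ (list1 : List Int) (list2 : List Int), Dom_getMerge list1 list2 → Spec_getMerge list1 list2 (getMerge list1 list2)

-- ===== LEMMAS AND PROOFS =====

-- duplicate the first occurrence of m (what A's index/insert amounts to)
def dupFirst : List Int → Int → List Int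
  | [], _ => []
  | a :: t, m => if a = m then m :: a :: t else a :: dupFirst t m

-- the shape of the result: each first occurrence of v in d (relative to the
-- already-emitted set em) expands to (extra[v]+1) copies, later occurrences stay single
def renderR (extra : PySem.Dict Int Nat) : List Int → List Int → List Int
  | [], _ => []
  | v :: t, em =>
    if v ∈ em then v :: renderR extra t em
    else List.replicate (extra.getD v 0 + 1) v ++ renderR extra t (v :: em)

lemma dupFirst_append_not_mem (pre suf : List Int) (m : Int) (h : m ∉ pre) :
    dupFirst (pre ++ m :: suf) m = pre ++ m :: m :: suf := by
  induction pre with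
  | nil => simp [dupFirst]
  | cons a t ih =>
    have ha : a ≠ m := by intro e; exact h (by simp [e])
    simp [dupFirst, ha, ih (by intro hm; exact h (by simp [hm]))]

lemma dupFirst_replicate_append (n : Nat) (v : Int) (rest : List Int) (m : Int) (h : v ≠ m) :
    dupFirst (List.replicate n v ++ rest) m = List.replicate n v ++ dupFirst rest m := by
  induction n with
  | zero => simp
  | succ k ih => simp [List.replicate_succ, dupFirst, h, ih]

lemma mergeStepA_eq (l : List Int) (m : Int) :
    mergeStepA l m = if m ∈ l then dupFirst l m else l ++ [m] := by
  by_cases h : m ∈ l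
  · obtain ⟨k, hk⟩ := (PySem.List.index?_isSome_iff l m).2 h |> Option.isSome_iff_exists.1
    obtain ⟨pre, suf, hl, hlen, hpre⟩ := (PySem.List.index?_eq_some_iff l m k).1 hk
    subst hl
    have hkle : k ≤ (pre ++ m :: suf).length := by simp [← hlen]
    simp only [mergeStepA, if_pos h, hk]
    rw [PySem.List.insert_natCast _ k m hkle, ← hlen, List.take_left, List.drop_left,
      dupFirst_append_not_mem pre suf m hpre]
  · simp [mergeStepA, h]

lemma mem_renderR (extra : PySem.Dict Int Nat) (d em : List Int) (x : Int) :
    x ∈ renderR extra d em ↔ x ∈ d := by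
  induction d generalizing em with
  | nil => simp [renderR]
  | cons v t ih =>
    by_cases hv : v ∈ em
    · simp [renderR, hv, ih]
    · rw [renderR, if_neg hv]
      simp only [List.mem_append, List.mem_replicate, List.mem_cons, ih]
      constructor
      · rintro (⟨_, h⟩ | h) <;> [exact Or.inl h; exact Or.inr h]
      · rintro (h | h) <;> [exact Or.inl ⟨Nat.succ_ne_zero _, h⟩; exact Or.inr h]

lemma renderR_congr_em (extra : PySem.Dict Int Nat) (d em em' : List Int)
    (h : ∀ x, x ∈ em ↔ x ∈ em') : renderR extra d em = renderR extra d em' := by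
  induction d generalizing em em' with
  | nil => rfl
  | cons v t ih =>
    by_cases hv : v ∈ em
    · rw [renderR, renderR, if_pos hv, if_pos ((h v).1 hv), ih em em' h]
    · rw [renderR, renderR, if_neg hv, if_neg (fun hv' => hv ((h v).2 hv')),
        ih (v :: em) (v :: em') (by intro x; simp [h x])]

lemma renderR_insert_mem (extra : PySem.Dict Int Nat) (d em : List Int) (m : Int) (c : Nat)
    (hm : m ∈ em) : renderR (extra.insert m c) d em = renderR extra d em := by
  induction d generalizing em with
  | nil => rfl
  | cons v t ih =>
    by_cases hv : v ∈ em
    · rw [renderR, renderR, if_pos hv, if_pos hv, ih em hm]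
    · have hvm : v ≠ m := fun e => hv (e ▸ hm)
      rw [renderR, renderR, if_neg hv, if_neg hv,
        PySem.Dict.getD_insert_of_ne extra c 0 hvm, ih (v :: em) (by simp [hm])]

lemma renderR_zero (extra : PySem.Dict Int Nat) (d em : List Int)
    (h : ∀ v, extra.getD v 0 = 0) : renderR extra d em = d := by
  induction d generalizing em with
  | nil => rfl
  | cons v t ih =>
    by_cases hv : v ∈ em <;> simp [renderR, hv, h, ih]

lemma renderR_dup (extra : PySem.Dict Int Nat) (d em : List Int) (m : Int)
    (hd : m ∈ d) (hem : m ∉ em) :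
    dupFirst (renderR extra d em) m
      = renderR (extra.insert m (extra.getD m 0 + 1)) d em := by
  induction d generalizing em extra with
  | nil => simp at hd
  | cons v t ih =>
    by_cases hv : v ∈ em
    · have hvm : v ≠ m := fun e => hem (e ▸ hv)
      have hmt : m ∈ t := by
        rcases List.mem_cons.1 hd with h | h
        · exact absurd h (Ne.symm hvm)
        · exact h
      rw [renderR, renderR, if_pos hv, if_pos hv, dupFirst, if_neg hvm,
        ih extra em hmt hem]
    · by_cases hvm : v = m
      · subst hvm
        rw [renderR, renderR, if_neg hv, if_neg hv, PySem.Dict.getD_insert_self,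
          renderR_insert_mem extra t (v :: em) v _ (by simp)]
        simp [List.replicate_succ, dupFirst]
      · have hmt : m ∈ t := by
          rcases List.mem_cons.1 hd with h | h
          · exact absurd h (Ne.symm hvm)
          · exact h
        have hmem' : m ∉ v :: em := by
          intro h
          rcases List.mem_cons.1 h with e | e
          · exact hvm e.symm
          · exact hem e
        rw [renderR, renderR, if_neg hv, if_neg hv,
          dupFirst_replicate_append _ v _ m hvm,
          PySem.Dict.getD_insert_of_ne extra _ 0 hvm,
          ih extra (v :: em) hmt hmem']

lemma renderR_append_new (extra : PySem.Dict Int Nat) (d em : List Int) (m : Int)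
    (hd : m ∉ d) (hem : m ∉ em) (hz : extra.getD m 0 = 0) :
    renderR extra (d ++ [m]) em = renderR extra d em ++ [m] := by
  induction d generalizing em with
  | nil => simp [renderR, hem, hz]
  | cons v t ih =>
    have hvm : v ≠ m := fun e => hd (by simp [e])
    have hdt : m ∉ t := fun h => hd (by simp [h])
    have hmem' : m ∉ v :: em := by
      intro h
      rcases List.mem_cons.1 h with e | e
      · exact hvm e.symm
      · exact hem e
    by_cases hv : v ∈ em
    · rw [List.cons_append, renderR, renderR, if_pos hv, if_pos hv, ih em hdt hem]
      simp
    · rw [List.cons_append, renderR, renderR, if_neg hv, if_neg hv,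
        ih (v :: em) hdt hmem']
      simp

-- B's second loop computes renderR
lemma foldl_mergeEmit (extra : PySem.Dict Int Nat) (d : List Int) :
    ∀ (out em : List Int),
      (d.foldl (mergeEmit extra) (out, em)).1 = out ++ renderR extra d em := by
  induction d with
  | nil => intro out em; simp [renderR]
  | cons v t ih =>
    intro out em
    by_cases hv : v ∈ em
    · have hc : PySem.Set.contains em v = true := (PySem.Set.contains_iff em v).2 hv
      rw [List.foldl_cons, mergeEmit, hc, if_pos rfl, ih, renderR, if_pos hv]
      simp
    · have hc : PySem.Set.contains em v = false := by
        cases h : PySem.Set.contains em v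
        · rfl
        · exact absurd ((PySem.Set.contains_iff em v).1 h) hv
      rw [List.foldl_cons, mergeEmit, hc]
      simp only [Bool.false_eq_true, if_false]
      rw [ih, renderR, if_neg hv,
        renderR_congr_em extra t (PySem.Set.add em v) (v :: em)
          (by intro x; simp [PySem.Set.mem_add, or_comm])]
      simp

-- main loop invariant: A's evolving list is renderR of B's evolving state
lemma merge_loop (list1 : List Int) (l2 : List Int) :
    ∀ (extra : PySem.Dict Int Nat) (seen : PySem.Set Int) (order : List Int),
      (∀ x, x ∈ seen ↔ x ∈ list1 ++ order) →
      (∀ m, m ∉ list1 ++ order → extra.getD m 0 = 0) →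
      l2.foldl mergeStepA (renderR extra (list1 ++ order) []) =
        renderR (l2.foldl mergeCount (extra, seen, order)).1
          (list1 ++ (l2.foldl mergeCount (extra, seen, order)).2.2) [] := by
  induction l2 with
  | nil => intro extra seen order _ _; rfl
  | cons m t ih =>
    intro extra seen order hseen hz
    by_cases hm : m ∈ list1 ++ order
    · have hc : PySem.Set.contains seen m = true :=
        (PySem.Set.contains_iff seen m).2 ((hseen m).2 hm)
      have hmem : m ∈ renderR extra (list1 ++ order) [] :=
        (mem_renderR extra _ [] m).2 hm
      rw [List.foldl_cons, List.foldl_cons, mergeStepA_eq, if_pos hmem,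
        mergeCount, hc, if_pos rfl,
        renderR_dup extra (list1 ++ order) [] m hm (by simp)]
      exact ih (extra.insert m (extra.getD m 0 + 1)) seen order hseen
        (fun m' hm' => by
          rw [PySem.Dict.getD_insert_of_ne extra _ 0 (by intro e; exact hm' (by rw [e]; exact hm))]
          exact hz m' hm')
    · have hc : PySem.Set.contains seen m = false := by
        cases h : PySem.Set.contains seen m
        · rfl
        · exact absurd ((hseen m).1 ((PySem.Set.contains_iff seen m).1 h)) hm
      have hmem : m ∉ renderR extra (list1 ++ order) [] :=
        fun h => hm ((mem_renderR extra _ [] m).1 h)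
      rw [List.foldl_cons, List.foldl_cons, mergeStepA_eq, if_neg hmem,
        mergeCount, hc]
      simp only [Bool.false_eq_true, if_false]
      have happ : renderR extra (list1 ++ order) [] ++ [m]
          = renderR extra (list1 ++ (order ++ [m])) [] := by
        rw [← List.append_assoc]
        exact (renderR_append_new extra (list1 ++ order) [] m hm (by simp) (hz m hm)).symm
      rw [happ]
      exact ih extra (PySem.Set.add seen m) (order ++ [m])
        (by intro x; simp [PySem.Set.mem_add, hseen x, List.mem_append]; tauto)
        (fun m' hm' => hz m' (by
          intro h
          apply hm'
          simp only [List.mem_append] at h ⊢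
          tauto))

-- ===== VERDICT (by name: the statement is the Claim_ definition above) =====
theorem getMerge_spec : Claim_equal_getMerge := by
  intro list1 list2 _
  unfold Spec_getMerge getMerge getMerge_alt
  rw [foldl_mergeEmit]
  have h := merge_loop list1 list2 PySem.Dict.empty (PySem.Set.ofList list1) []
    (by intro x; simp [PySem.Set.mem_ofList])
    (by intro m _; simp [PySem.Dict.getD_empty])
  simp only [List.append_nil] at h
  rw [renderR_zero PySem.Dict.empty list1 [] (fun v => PySem.Dict.getD_empty v 0)] at h
  exact h
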